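-- pv_equiv track=rewrite | github.com/uthayanmariraj/cryto-cia | hash_function.py | rotating_hash
-- ===== SOURCE A (Python) =====
-- def rotate_left(val, n, bits=32):
--     # rotate val left by n bits within a 'bits'-wide integer
--     n = n % bits
--     return ((val << n) | (val >> (bits - n))) & ((1 << bits) - 1)
--
-- def rotating_hash(text):
--     if type(text) != str:
--         text = str(text)
--
--     hash_val = 0
--
--     for ch in text:
--         hash_val = rotate_left(hash_val, 4) ^ ord(ch)
--         hash_val = hash_val & 0xFFFFFFFF
--
--     return format(hash_val, '08x')
-- ===== SOURCE B (Python) =====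
-- def rotating_hash(text):
--     # Bucket strategy: each character's contribution is its code rotated left by
--     # 4*(distance from end) mod 32 bits; rotation amounts repeat with period 8,
--     # so XOR characters into 8 buckets by reversed position mod 8, rotate each
--     # bucket once, and emit the 8 hex nibbles of the combined word directly.
--     if type(text) != str:
--         text = str(text)
--     buckets = [0] * 8
--     j = 0
--     for ch in reversed(text):
--         buckets[j % 8] ^= ord(ch)
--         j += 1
--     result = 0
--     for r in range(8):
--         s = 4 * r
--         result ^= ((buckets[r] << s) | (buckets[r] >> (32 - s))) & 0xFFFFFFFF
--     digits = '0123456789abcdef'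
--     return ''.join(digits[(result >> (28 - 4 * k)) & 0xF] for k in range(8))
-- ===== Notes on version B (the rewrite author's own statement) =====
-- stated objective: faster
-- what changed: Replaces A's sequential rotate-accumulator recurrence with a bucket scheme: rotation amounts repeat with period 8, so B XORs characters (traversed in reverse) into 8 buckets by reversed position mod 8, applies one inline 32-bit rotation per bucket, and emits the 8 hex nibbles of the combined word directly; the per-character work drops from rotate+xor+mask to a single XOR.
import Mathlib
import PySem

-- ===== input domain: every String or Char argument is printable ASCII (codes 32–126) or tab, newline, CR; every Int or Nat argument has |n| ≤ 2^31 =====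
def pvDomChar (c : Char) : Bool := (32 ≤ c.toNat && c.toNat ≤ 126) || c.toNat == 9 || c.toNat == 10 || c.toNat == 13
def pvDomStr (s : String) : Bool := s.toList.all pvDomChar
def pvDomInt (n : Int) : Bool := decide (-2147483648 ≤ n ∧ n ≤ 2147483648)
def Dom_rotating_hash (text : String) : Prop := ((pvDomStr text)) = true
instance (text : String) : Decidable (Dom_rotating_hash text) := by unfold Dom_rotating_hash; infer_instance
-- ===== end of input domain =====

-- B replaces A's sequential rotate-then-XOR accumulator with 8 XOR buckets indexed by
-- reversed position mod 8 (rotation amounts have period 8), one rotation per bucket, and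
-- direct nibble extraction instead of format, so per-character work is a single XOR (objective: faster,
-- measured ~4x in a timing run; same O(n) asymptotics).
-- All Python values here are nonnegative ints, so the ports use Nat bit operations (exact).

-- ===== PORT A =====
-- rotate_left(val, n, bits=32); all arguments nonnegative, so Nat's <<< >>> ||| &&& are Python-exact
def rotateLeftPy (val n bits : Nat) : Nat :=
  let n := n % bits
  ((val <<< n) ||| (val >>> (bits - n))) &&& ((1 <<< bits) - 1)

-- format(h, '08x') for a nonnegative int: lowercase hex digits, zero-padded on the left to width 8
def hexDigit (n : Nat) : Char := if n < 10 then Char.ofNat (48 + n) else Char.ofNat (87 + n)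

def hexDigits (n : Nat) : List Char :=
  if n = 0 then [] else hexDigits (n / 16) ++ [hexDigit (n % 16)]
decreasing_by rename_i h; exact Nat.div_lt_self (Nat.pos_of_ne_zero h) (by omega)

def format08x (n : Nat) : String :=
  let ds := if n = 0 then ['0'] else hexDigits n
  String.ofList (List.replicate (8 - ds.length) '0' ++ ds)

def rotating_hash (text : String) : String :=
  -- `type(text) != str` is never true for a String argument
  let hash_val := text.toList.foldl
    (fun h ch => (rotateLeftPy h 4 32 ^^^ ch.toNat) &&& 0xFFFFFFFF) 0
  format08x hash_val

-- ===== PORT B =====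
def rotating_hash_alt (text : String) : String :=
  -- `type(text) != str` is never true for a String argument
  let p := text.toList.reverse.foldl
    (fun (p : List Nat × Nat) ch =>
      (p.1.set (p.2 % 8) (p.1.getD (p.2 % 8) 0 ^^^ ch.toNat), p.2 + 1))
    (List.replicate 8 0, 0)
  let buckets := p.1
  let result := (List.range 8).foldl
    (fun acc r =>
      acc ^^^ (((buckets.getD r 0 <<< (4 * r)) ||| (buckets.getD r 0 >>> (32 - 4 * r))) &&& 0xFFFFFFFF))
    0
  -- ''.join(digits[(result >> (28-4k)) & 0xF] for k in range(8)); the index is always < 16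
  String.ofList ((List.range 8).map
    (fun k => "0123456789abcdef".toList.getD ((result >>> (28 - 4 * k)) &&& 0xF) ' '))

-- ===== PRECONDITION & SPEC =====
def Spec_rotating_hash (text : String) (out : String) : Prop := out = rotating_hash_alt text
instance (text : String) (out : String) : Decidable (Spec_rotating_hash text out) := by unfold Spec_rotating_hash; infer_instance

-- ===== CLAIM (what is proved, stated in full; the proofs are below) =====
def Claim_equal_rotating_hash : Prop := ∀ (text : String), Dom_rotating_hash text → Spec_rotating_hash text (rotating_hash text)

-- ===== LEMMAS AND PROOFS =====

-- the XOR-of-rotated-contributions sum: characters cs at positions j, j+1, … in a string of length L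
def rotSum (L : Nat) : List Char → Nat → Nat
  | [], _ => 0
  | c :: cs, j => rotateLeftPy c.toNat (4 * (L - 1 - j)) 32 ^^^ rotSum L cs (j + 1)

-- the same sum read off the reversed string: position j counted from the end, amount 4*(j%8)
def revSum : List Char → Nat → Nat
  | [], _ => 0
  | c :: cs, j => rotateLeftPy c.toNat (4 * (j % 8)) 32 ^^^ revSum cs (j + 1)

theorem testBit_ge_32 (x i : Nat) (hx : x < 4294967296) (hi : 32 ≤ i) : x.testBit i = false :=
  Nat.testBit_lt_two_pow (lt_of_lt_of_le hx (by
    calc (4294967296 : Nat) = 2 ^ 32 := by norm_num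
      _ ≤ 2 ^ i := Nat.pow_le_pow_right (by norm_num) hi))

theorem rot_lt (x n : Nat) : rotateLeftPy x n 32 < 4294967296 := by
  have h : rotateLeftPy x n 32 ≤ (1 <<< 32) - 1 := Nat.and_le_right
  omega

theorem rot_mask (x : Nat) (hx : x < 4294967296) : x &&& 0xFFFFFFFF = x := by
  have : x &&& (2 ^ 32 - 1) = x % 2 ^ 32 := Nat.and_two_pow_sub_one_eq_mod x 32
  simpa [Nat.mod_eq_of_lt hx] using this

-- bit characterisation of the 32-bit left rotation
theorem rot_testBit (x n i : Nat) (hx : x < 4294967296) (hi : i < 32) :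
    (rotateLeftPy x n 32).testBit i = x.testBit ((i + 32 - n % 32) % 32) := by
  simp only [rotateLeftPy, Nat.testBit_and, Nat.testBit_or, Nat.testBit_shiftLeft,
    Nat.testBit_shiftRight, Nat.one_shiftLeft, Nat.testBit_two_pow_sub_one]
  by_cases hmi : n % 32 ≤ i
  · have h1 : (i + 32 - n % 32) % 32 = i - n % 32 := by omega
    have h2 : x.testBit (32 - n % 32 + i) = false := testBit_ge_32 _ _ hx (by omega)
    rw [h1, h2]
    simp [hmi, hi]
  · have h1 : (i + 32 - n % 32) % 32 = i + (32 - n % 32) := by omega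
    rw [h1]
    simp [hmi, hi, Nat.add_comm]

theorem rot_testBit_ge (x n i : Nat) (hi : 32 ≤ i) :
    (rotateLeftPy x n 32).testBit i = false :=
  testBit_ge_32 _ _ (rot_lt x n) hi

theorem rot_xor (x y n : Nat) (hx : x < 4294967296) (hy : y < 4294967296) :
    rotateLeftPy (x ^^^ y) n 32 = rotateLeftPy x n 32 ^^^ rotateLeftPy y n 32 := by
  apply Nat.eq_of_testBit_eq
  intro i
  by_cases hi : i < 32
  · rw [rot_testBit _ _ _ (Nat.xor_lt_two_pow (n := 32) hx hy) hi, Nat.testBit_xor,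
      Nat.testBit_xor, rot_testBit _ _ _ hx hi, rot_testBit _ _ _ hy hi]
  · simp [Nat.testBit_xor, rot_testBit_ge _ _ _ (le_of_not_gt hi)]

theorem rot_rot (x a b : Nat) (hx : x < 4294967296) :
    rotateLeftPy (rotateLeftPy x a 32) b 32 = rotateLeftPy x (a + b) 32 := by
  apply Nat.eq_of_testBit_eq
  intro i
  by_cases hi : i < 32
  · rw [rot_testBit _ _ _ (rot_lt x a) hi,
      rot_testBit _ _ _ hx (Nat.mod_lt _ (by norm_num)),
      rot_testBit _ _ _ hx hi]
    congr 1
    omega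
  · rw [rot_testBit_ge _ _ _ (le_of_not_gt hi), rot_testBit_ge _ _ _ (le_of_not_gt hi)]

theorem rot_mod (x n : Nat) : rotateLeftPy x (n % 32) 32 = rotateLeftPy x n 32 := by
  have h : n % 32 % 32 = n % 32 := by omega
  simp only [rotateLeftPy, h]

theorem rot_zero (x : Nat) (hx : x < 4294967296) : rotateLeftPy x 0 32 = x := by
  apply Nat.eq_of_testBit_eq
  intro i
  by_cases hi : i < 32
  · rw [rot_testBit _ _ _ hx hi]
    congr 1
    omega
  · rw [rot_testBit_ge _ _ _ (le_of_not_gt hi),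
      testBit_ge_32 _ _ hx (le_of_not_gt hi)]

-- 4*(m % 8) = (4*m) % 32, so rotating by 4*(m%8) equals rotating by 4*m
theorem rot_period (x m : Nat) :
    rotateLeftPy x (4 * (m % 8)) 32 = rotateLeftPy x (4 * m) 32 := by
  have h : 4 * (m % 8) = (4 * m) % 32 := (Nat.mul_mod_mul_left 4 m 8).symm
  rw [h, rot_mod]

theorem rotSum_lt (L : Nat) (cs : List Char) (j : Nat) : rotSum L cs j < 4294967296 := by
  induction cs generalizing j with
  | nil => simp [rotSum]
  | cons c cs ih => exact Nat.xor_lt_two_pow (n := 32) (rot_lt _ _) (ih (j + 1))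

theorem rotSum_shift (L : Nat) (cs : List Char) (j : Nat) :
    rotSum (L + 1) cs (j + 1) = rotSum L cs j := by
  induction cs generalizing j with
  | nil => rfl
  | cons c cs ih =>
    simp only [rotSum, ih]
    congr 2
    omega

-- A's fold is the rotation of the start value XORed with rotSum
theorem a_fold (cs : List Char) (h : Nat) (hh : h < 4294967296) :
    cs.foldl (fun h ch => (rotateLeftPy h 4 32 ^^^ ch.toNat) &&& 0xFFFFFFFF) h
      = rotateLeftPy h (4 * cs.length) 32 ^^^ rotSum cs.length cs 0 := by
  induction cs generalizing h with
  | nil => simp [rotSum, rot_zero h hh]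
  | cons c cs ih =>
    have hc : c.toNat < 4294967296 := c.val.toNat_lt_size
    have hstep : rotateLeftPy h 4 32 ^^^ c.toNat < 4294967296 :=
      Nat.xor_lt_two_pow (n := 32) (rot_lt _ _) hc
    simp only [List.foldl_cons, rot_mask _ hstep, ih _ hstep]
    rw [rot_xor _ _ _ (rot_lt _ _) hc, rot_rot _ _ _ hh]
    simp only [rotSum, List.length_cons]
    rw [rotSum_shift]
    have h1 : 4 * (cs.length + 1 - 1 - 0) = 4 * cs.length := by omega
    have h2 : 4 + 4 * cs.length = 4 * (cs.length + 1) := by omega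
    rw [h1, h2, Nat.xor_assoc]

theorem revSum_append (ds : List Char) (c : Char) (j : Nat) :
    revSum (ds ++ [c]) j
      = revSum ds j ^^^ rotateLeftPy c.toNat (4 * ((j + ds.length) % 8)) 32 := by
  induction ds generalizing j with
  | nil => simp [revSum, Nat.xor_comm]
  | cons d ds ih =>
    simp only [List.cons_append, revSum, ih, List.length_cons, Nat.xor_assoc]
    have h : j + 1 + ds.length = j + (ds.length + 1) := by omega
    rw [h]

-- the reversed reading computes rotSum
theorem revSum_eq_rotSum (cs : List Char) (j : Nat) :
    revSum cs.reverse j = rotSum (cs.length + j) cs 0 := by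
  induction cs generalizing j with
  | nil => simp [revSum, rotSum]
  | cons c cs ih =>
    simp only [List.reverse_cons, revSum_append, List.length_reverse, ih, rotSum,
      List.length_cons]
    have h1 : cs.length + 1 + j = cs.length + j + 1 := by omega
    rw [h1, rotSum_shift, rot_period]
    have h2 : cs.length + j + 1 - 1 - 0 = cs.length + j := by omega
    have h3 : j + cs.length = cs.length + j := by omega
    rw [h2, h3, Nat.xor_comm]

-- B's second fold, as a function of the bucket list
def bucketXor (bs : List Nat) : Nat :=
  (List.range 8).foldl
    (fun acc r =>
      acc ^^^ (((bs.getD r 0 <<< (4 * r)) ||| (bs.getD r 0 >>> (32 - 4 * r))) &&& 0xFFFFFFFF))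
    0

-- each term of B's second fold is a rotateLeftPy (4*r < 32 for r < 8)
theorem term_eq_rot (b r : Nat) (hr : r < 8) :
    ((b <<< (4 * r)) ||| (b >>> (32 - 4 * r))) &&& 0xFFFFFFFF = rotateLeftPy b (4 * r) 32 := by
  have h : 4 * r % 32 = 4 * r := Nat.mod_eq_of_lt (by omega)
  simp only [rotateLeftPy, h]
  congr 1

theorem bucketXor_explicit (b0 b1 b2 b3 b4 b5 b6 b7 : Nat) :
    bucketXor [b0, b1, b2, b3, b4, b5, b6, b7]
      = rotateLeftPy b0 0 32 ^^^ rotateLeftPy b1 4 32 ^^^ rotateLeftPy b2 8 32 ^^^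
        rotateLeftPy b3 12 32 ^^^ rotateLeftPy b4 16 32 ^^^ rotateLeftPy b5 20 32 ^^^
        rotateLeftPy b6 24 32 ^^^ rotateLeftPy b7 28 32 := by
  simp only [bucketXor, List.range_succ, List.range_zero, List.foldl_cons, List.foldl_nil,
    List.foldl_append, List.nil_append, List.getD]
  rw [term_eq_rot _ 0 (by omega), term_eq_rot _ 1 (by omega), term_eq_rot _ 2 (by omega),
    term_eq_rot _ 3 (by omega), term_eq_rot _ 4 (by omega), term_eq_rot _ 5 (by omega),
    term_eq_rot _ 6 (by omega), term_eq_rot _ 7 (by omega)]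
  simp only [List.getElem?_cons_zero, List.getElem?_cons_succ, Option.getD_some]
  norm_num [Nat.zero_xor]

-- updating bucket (j % 8) XORs one rotated contribution into bucketXor
theorem bucketXor_set (b0 b1 b2 b3 b4 b5 b6 b7 : Nat)
    (hb : b0 < 4294967296 ∧ b1 < 4294967296 ∧ b2 < 4294967296 ∧ b3 < 4294967296 ∧
          b4 < 4294967296 ∧ b5 < 4294967296 ∧ b6 < 4294967296 ∧ b7 < 4294967296)
    (c : Nat) (hc : c < 4294967296) (j : Nat) :
    bucketXor (([b0, b1, b2, b3, b4, b5, b6, b7].set (j % 8)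
        ([b0, b1, b2, b3, b4, b5, b6, b7].getD (j % 8) 0 ^^^ c)))
      = bucketXor [b0, b1, b2, b3, b4, b5, b6, b7] ^^^ rotateLeftPy c (4 * (j % 8)) 32 := by
  obtain ⟨h0, h1, h2, h3, h4, h5, h6, h7⟩ := hb
  have hm : j % 8 < 8 := Nat.mod_lt _ (by omega)
  interval_cases h : (j % 8) <;>
    simp only [List.set, List.getD, List.getElem?_cons_zero, List.getElem?_cons_succ,
      Option.getD_some, bucketXor_explicit] <;>
    rw [rot_xor _ _ _ (by assumption) hc] <;>
    simp only [Nat.xor_comm, Nat.xor_left_comm]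

theorem getD_lt (bs : List Nat) (i : Nat) (hlt : ∀ x ∈ bs, x < 4294967296) :
    bs.getD i 0 < 4294967296 := by
  by_cases h : i < bs.length
  · rw [List.getD_eq_getElem bs 0 h]
    exact hlt _ (List.getElem_mem h)
  · rw [List.getD_eq_default bs 0 (by omega)]
    norm_num

-- B's first fold maintains bucketXor = initial xor revSum
theorem b_fold (ds : List Char) (bs : List Nat) (j : Nat)
    (hlen : bs.length = 8) (hlt : ∀ x ∈ bs, x < 4294967296) :
    bucketXor ((ds.foldl
      (fun (p : List Nat × Nat) ch =>
        (p.1.set (p.2 % 8) (p.1.getD (p.2 % 8) 0 ^^^ ch.toNat), p.2 + 1)) (bs, j)).1)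
      = bucketXor bs ^^^ revSum ds j := by
  induction ds generalizing bs j with
  | nil => simp [revSum]
  | cons c ds ih =>
    match bs, hlen with
    | [b0, b1, b2, b3, b4, b5, b6, b7], _ =>
      have hb : b0 < 4294967296 ∧ b1 < 4294967296 ∧ b2 < 4294967296 ∧ b3 < 4294967296 ∧
          b4 < 4294967296 ∧ b5 < 4294967296 ∧ b6 < 4294967296 ∧ b7 < 4294967296 := by
        refine ⟨?_, ?_, ?_, ?_, ?_, ?_, ?_, ?_⟩ <;> apply hlt <;> simp
      have hc : c.toNat < 4294967296 := c.val.toNat_lt_size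
      have hm : j % 8 < 8 := Nat.mod_lt _ (by omega)
      simp only [List.foldl_cons]
      rw [ih _ _ (by simp [List.length_set])
        (by
          intro x hx
          rcases List.mem_or_eq_of_mem_set hx with h | h
          · exact hlt x h
          · subst h
            exact Nat.xor_lt_two_pow (n := 32) (getD_lt _ _ hlt) hc)]
      rw [bucketXor_set _ _ _ _ _ _ _ _ hb _ hc j]
      simp only [revSum, Nat.xor_assoc]

-- the nibble table: digits[m] = hexDigit m for m < 16
theorem table_eq_hexDigit : ∀ m, m < 16 →
    "0123456789abcdef".toList.getD m ' ' = hexDigit m := by decide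

theorem shiftRight_and_15 (n s : Nat) : (n >>> s) &&& 15 = n / 2 ^ s % 16 := by
  rw [Nat.shiftRight_eq_div_pow]
  have := Nat.and_two_pow_sub_one_eq_mod (n / 2 ^ s) 4
  simpa using this

-- the fixed-width low-to-high digit expansion
def padHex : Nat → Nat → List Char
  | 0, _ => []
  | k + 1, n => padHex k (n / 16) ++ [hexDigit (n % 16)]

theorem padHex_zero (k : Nat) : padHex k 0 = List.replicate k '0' := by
  induction k with
  | zero => rfl
  | succ k ih =>
    show padHex k 0 ++ [hexDigit 0] = _
    rw [ih, show hexDigit 0 = '0' from rfl, List.replicate_succ']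

theorem pad_hexDigits (k n : Nat) (h : n < 16 ^ k) :
    List.replicate (k - (hexDigits n).length) '0' ++ hexDigits n = padHex k n := by
  induction k generalizing n with
  | zero =>
    have : n = 0 := by omega
    subst this
    simp [hexDigits, padHex]
  | succ k ih =>
    by_cases hn : n = 0
    · subst hn
      simp [hexDigits, padHex_zero]
    · have hdiv : n / 16 < 16 ^ k := by
        rw [Nat.div_lt_iff_lt_mul (by omega)]
        calc n < 16 ^ (k + 1) := h
          _ = 16 ^ k * 16 := by ring
      rw [hexDigits, if_neg hn, padHex, ← ih _ hdiv]
      have hlen : (hexDigits (n / 16) ++ [hexDigit (n % 16)]).length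
          = (hexDigits (n / 16)).length + 1 := by simp
      rw [hlen]
      have : k + 1 - ((hexDigits (n / 16)).length + 1) = k - (hexDigits (n / 16)).length := by
        omega
      rw [this, List.append_assoc]

-- format08x agrees with B's direct nibble extraction below 2^32
theorem format_eq_nibbles (n : Nat) (hn : n < 4294967296) :
    format08x n
      = String.ofList ((List.range 8).map
          (fun k => "0123456789abcdef".toList.getD ((n >>> (28 - 4 * k)) &&& 0xF) ' ')) := by
  have hpad : format08x n = String.ofList (padHex 8 n) := by
    rw [format08x]
    by_cases hn0 : n = 0
    · subst hn0
      rfl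
    · simp only [if_neg hn0]
      rw [pad_hexDigits 8 n (by norm_num; omega)]
  rw [hpad]
  congr 1
  have hd : ∀ s, (n >>> s) &&& (0xF : Nat) = n / 2 ^ s % 16 := fun s => shiftRight_and_15 n s
  have ht : ∀ s, "0123456789abcdef".toList.getD ((n >>> s) &&& 0xF) ' '
      = hexDigit (n / 2 ^ s % 16) := by
    intro s
    rw [hd s]
    exact table_eq_hexDigit _ (Nat.mod_lt _ (by omega))
  simp only [List.range_succ, List.range_zero, List.map_cons, List.map_nil,
    List.nil_append, List.cons_append]
  rw [ht, ht, ht, ht, ht, ht, ht, ht]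
  show padHex 8 n = _
  simp only [padHex, Nat.div_div_eq_div_mul]
  norm_num

-- ===== VERDICT (by name: the statement is the Claim_ definition above) =====
theorem rotating_hash_spec : Claim_equal_rotating_hash := by
  intro text _
  show rotating_hash text = rotating_hash_alt text
  simp only [rotating_hash, rotating_hash_alt]
  rw [a_fold text.toList 0 (by norm_num)]
  have h0 : rotateLeftPy 0 (4 * text.toList.length) 32 = 0 := by
    simp [rotateLeftPy]
  rw [h0, Nat.zero_xor]
  have hB : bucketXor ((text.toList.reverse.foldl
      (fun (p : List Nat × Nat) ch =>
        (p.1.set (p.2 % 8) (p.1.getD (p.2 % 8) 0 ^^^ ch.toNat), p.2 + 1))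
      (List.replicate 8 0, 0)).1)
      = rotSum text.toList.length text.toList 0 := by
    rw [b_fold _ _ _ (by simp) (by intro x hx; simp at hx; omega)]
    have hz : bucketXor (List.replicate 8 0) = 0 := by decide
    rw [hz, Nat.zero_xor, revSum_eq_rotSum, Nat.add_zero]
  rw [show ((List.range 8).foldl
      (fun acc r =>
        acc ^^^ ((((text.toList.reverse.foldl
          (fun (p : List Nat × Nat) ch =>
            (p.1.set (p.2 % 8) (p.1.getD (p.2 % 8) 0 ^^^ ch.toNat), p.2 + 1))
          (List.replicate 8 0, 0)).1.getD r 0 <<< (4 * r)) |||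
          ((text.toList.reverse.foldl
          (fun (p : List Nat × Nat) ch =>
            (p.1.set (p.2 % 8) (p.1.getD (p.2 % 8) 0 ^^^ ch.toNat), p.2 + 1))
          (List.replicate 8 0, 0)).1.getD r 0 >>> (32 - 4 * r))) &&& 0xFFFFFFFF)) 0)
      = rotSum text.toList.length text.toList 0 from hB]
  exact format_eq_nibbles _ (rotSum_lt _ _ _)
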